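-- pv_equiv track=rewrite | github.com/leehanjun506/Algorithm | 프로그래머스/lv1/12930. 이상한 문자 만들기/이상한 문자 만들기.py | solution
-- ===== SOURCE A (Python) =====
-- def solution(s):
--     ans = s.split(' ')
--     str = ''
--     for i in range(len(ans)):
--         if i != 0:
--             str+=' '
--         for j in range(len(ans[i])):
--             if (j+1)%2 == 1: #홀수
--                 str+=ans[i][j].upper()
--             else:
--                 str+=ans[i][j].lower()
--     return str
-- ===== SOURCE B (Python) =====
-- def solution(s):
--     out = []
--     cnt = 0
--     for ch in s:
--         if ch == ' ':
--             out.append(' ')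
--             cnt = 0
--         else:
--             out.append(ch.upper() if cnt % 2 == 0 else ch.lower())
--             cnt += 1
--     return ''.join(out)
-- ===== Notes on version B (the rewrite author's own statement) =====
-- stated objective: simpler
-- what changed: B replaces the single-space split plus nested index loops with one linear character scan keeping a within-word counter that resets at each space, joining the pieces at the end.
import Mathlib
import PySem

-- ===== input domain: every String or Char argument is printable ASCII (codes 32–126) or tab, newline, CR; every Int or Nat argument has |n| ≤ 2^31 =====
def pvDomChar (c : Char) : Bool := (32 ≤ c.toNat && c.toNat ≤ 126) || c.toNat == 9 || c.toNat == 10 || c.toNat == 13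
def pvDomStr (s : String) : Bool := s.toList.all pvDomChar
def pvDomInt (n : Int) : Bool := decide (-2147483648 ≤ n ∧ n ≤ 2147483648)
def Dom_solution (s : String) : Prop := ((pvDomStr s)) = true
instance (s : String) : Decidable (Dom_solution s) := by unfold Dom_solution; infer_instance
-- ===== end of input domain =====

-- B replaces A's single-space split and nested index loops with one linear scan carrying a
-- within-word counter that resets at each space (objective: simpler).

-- ===== PORT A =====
def solution (s : String) : String :=
  let ans := PySem.Chars.splitOn s.toList [' ']
  String.mk ((PySem.List.pyRange 0 (PySem.List.len ans) 1).foldl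
    (fun str i =>
      (PySem.List.pyRange 0 (PySem.List.len (PySem.List.pyGetD ans i [])) 1).foldl
        (fun str2 j =>
          if PySem.Int.mod (j + 1) 2 == 1 then
            str2 ++ [PySem.Chars.upperChar (PySem.List.pyGetD (PySem.List.pyGetD ans i []) j ' ')]
          else
            str2 ++ [PySem.Chars.lowerChar (PySem.List.pyGetD (PySem.List.pyGetD ans i []) j ' ')])
        (if i != 0 then str ++ [' '] else str))
    [])

-- ===== PORT B =====
def altStep (acc : List Char × Int) (ch : Char) : List Char × Int :=
  if ch = ' ' then (acc.1 ++ [' '], 0)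
  else (acc.1 ++ [if PySem.Int.mod acc.2 2 == 0 then PySem.Chars.upperChar ch
                  else PySem.Chars.lowerChar ch], acc.2 + 1)

def solution_alt (s : String) : String :=
  String.mk ((s.toList.foldl altStep ([], 0)).1)

-- ===== PRECONDITION & SPEC =====
def Spec_solution (s : String) (out : String) : Prop := out = solution_alt s
instance (s : String) (out : String) : Decidable (Spec_solution s out) := by unfold Spec_solution; infer_instance

-- ===== CLAIM (what is proved, stated in full; the proofs are below) =====
def Claim_equal_solution : Prop := ∀ (s : String), Dom_solution s → Spec_solution s (solution s)

-- ===== LEMMAS AND PROOFS =====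

-- case-map a word, alternating from counter k
def caseW (k : Int) : List Char → List Char
  | [] => []
  | c :: cs =>
      (if PySem.Int.mod k 2 == 0 then PySem.Chars.upperChar c else PySem.Chars.lowerChar c)
        :: caseW (k + 1) cs

def wordsOut (ws : List (List Char)) : List Char :=
  ws.flatMap (fun w => ' ' :: caseW 0 w)

-- clean structural characterisation of split on a single space
def mySplitP : List Char → List Char × List (List Char)
  | [] => ([], [])
  | c :: cs =>
      let r := mySplitP cs
      if c = ' ' then ([], r.1 :: r.2) else (c :: r.1, r.2)

-- result of B's scan starting from counter k
def bSpec (k : Int) : List Char → List Char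
  | [] => []
  | c :: cs =>
      if c = ' ' then ' ' :: bSpec 0 cs
      else (if PySem.Int.mod k 2 == 0 then PySem.Chars.upperChar c else PySem.Chars.lowerChar c)
             :: bSpec (k + 1) cs

lemma cond_eq (j : Int) :
    (PySem.Int.mod (j + 1) 2 == 1) = (PySem.Int.mod j 2 == 0) := by
  simp only [PySem.Int.mod, Int.fmod_eq_emod]
  by_cases h : j % 2 = 0
  · simp [h]; omega
  · simp [h]; omega

lemma foldl_pyRange_enum {α β : Type} (xs : List α) (d : α) (F : β → Int → α → β) (init : β) :
    (PySem.List.pyRange 0 (PySem.List.len xs) 1).foldl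
      (fun acc j => F acc j (PySem.List.pyGetD xs j d)) init
    = (PySem.List.enumerate xs 0).foldl (fun acc p => F acc p.1 p.2) init := by
  rw [PySem.List.enumerate_eq_map_pyRange xs d, List.foldl_map]

lemma inner_enum (w : List Char) (k : Int) (acc : List Char) :
    (PySem.List.enumerate w k).foldl
      (fun str2 q =>
        if PySem.Int.mod (q.1 + 1) 2 == 1 then str2 ++ [PySem.Chars.upperChar q.2]
        else str2 ++ [PySem.Chars.lowerChar q.2]) acc
    = acc ++ caseW k w := by
  induction w generalizing k acc with
  | nil => simp [PySem.List.enumerate, caseW]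
  | cons c cs ih =>
      rw [PySem.List.enumerate_cons, List.foldl_cons, ih]
      beta_reduce
      rw [cond_eq k]
      simp only [caseW]
      split <;> simp

def outerBody (str : List Char) (p : Int × List Char) : List Char :=
  (PySem.List.pyRange 0 (PySem.List.len p.2) 1).foldl
    (fun str2 j =>
      if PySem.Int.mod (j + 1) 2 == 1 then str2 ++ [PySem.Chars.upperChar (PySem.List.pyGetD p.2 j ' ')]
      else str2 ++ [PySem.Chars.lowerChar (PySem.List.pyGetD p.2 j ' ')])
    (if p.1 != 0 then str ++ [' '] else str)

lemma outerBody_eq (str : List Char) (p : Int × List Char) :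
    outerBody str p = (if p.1 != 0 then str ++ [' '] else str) ++ caseW 0 p.2 := by
  unfold outerBody
  rw [foldl_pyRange_enum p.2 ' '
      (fun str2 j c =>
        if PySem.Int.mod (j + 1) 2 == 1 then str2 ++ [PySem.Chars.upperChar c]
        else str2 ++ [PySem.Chars.lowerChar c])]
  exact inner_enum p.2 0 _

lemma outer_tail (ws : List (List Char)) (k : Int) (acc : List Char) (hk : 1 ≤ k) :
    (PySem.List.enumerate ws k).foldl
      (fun acc p => (if p.1 != 0 then acc ++ [' '] else acc) ++ caseW 0 p.2) acc
    = acc ++ wordsOut ws := by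
  induction ws generalizing k acc with
  | nil => simp [PySem.List.enumerate, wordsOut]
  | cons w ws ih =>
      rw [PySem.List.enumerate_cons, List.foldl_cons, ih (k + 1) _ (by omega)]
      have hk0 : (k != 0) = true := by simp; omega
      beta_reduce
      rw [hk0]
      simp [wordsOut]

lemma go_space (fuel : Nat) (l cur : List Char) (acc : List (List Char))
    (h : l.length < fuel) :
    PySem.Chars.splitOn.go [' '] fuel l cur acc
      = acc.reverse ++ (cur.reverse ++ (mySplitP l).1) :: (mySplitP l).2 := by
  induction fuel generalizing l cur acc with
  | zero => omega
  | succ f ih =>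
      cases l with
      | nil => simp [PySem.Chars.splitOn.go, mySplitP]
      | cons c rest =>
          rw [PySem.Chars.splitOn.go]
          by_cases hc : c = ' '
          · subst hc
            have hp : [' '].isPrefixOf (' ' :: rest) = true := by simp [List.isPrefixOf]
            simp only [hp, List.length_singleton, List.drop_one, List.tail_cons]
            rw [ih rest [] (cur.reverse :: acc) (by simpa using Nat.lt_of_succ_lt_succ h)]
            simp [mySplitP]
          · have hp : [' '].isPrefixOf (c :: rest) = false := by
              simp [List.isPrefixOf]; exact fun hh => (hc hh.symm).elim
            simp only [hp, Bool.false_eq_true, if_false]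
            rw [ih rest (c :: cur) acc (by simpa using Nat.lt_of_succ_lt_succ h)]
            simp [mySplitP, hc]

lemma splitOn_space (l : List Char) :
    PySem.Chars.splitOn l [' '] = (mySplitP l).1 :: (mySplitP l).2 := by
  unfold PySem.Chars.splitOn
  rw [go_space (l.length + 1) l [] [] (by omega)]
  simp

lemma solution_chars (s : String) :
    solution s
      = String.mk (caseW 0 (mySplitP s.toList).1 ++ wordsOut (mySplitP s.toList).2) := by
  show String.mk
      ((PySem.List.pyRange 0 (PySem.List.len (PySem.Chars.splitOn s.toList [' '])) 1).foldl
        (fun str i => outerBody str (i, PySem.List.pyGetD (PySem.Chars.splitOn s.toList [' ']) i []))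
        []) = _
  rw [foldl_pyRange_enum (PySem.Chars.splitOn s.toList [' ']) []
      (fun str i w => outerBody str (i, w))]
  rw [splitOn_space s.toList, PySem.List.enumerate_cons]
  simp only [List.foldl_cons, outerBody_eq, zero_add, List.nil_append]
  have h0 : ((0 : Int) != 0) = false := by decide
  rw [h0]
  simp only [Bool.false_eq_true, if_false]
  rw [outer_tail (mySplitP s.toList).2 1 _ (by omega)]
  simp

lemma foldB (cs acc : List Char) (k : Int) :
    (cs.foldl altStep (acc, k)).1 = acc ++ bSpec k cs := by
  induction cs generalizing acc k with
  | nil => simp [bSpec]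
  | cons c cs ih =>
      simp only [List.foldl_cons, altStep, bSpec]
      by_cases hc : c = ' '
      · simp [hc, ih]
      · simp [hc, ih]

lemma bSpec_eq (cs : List Char) (k : Int) :
    bSpec k cs = caseW k (mySplitP cs).1 ++ wordsOut (mySplitP cs).2 := by
  induction cs generalizing k with
  | nil => simp [bSpec, mySplitP, caseW, wordsOut]
  | cons c cs ih =>
      by_cases hc : c = ' '
      · simp only [bSpec, hc, mySplitP, ih 0]
        simp [caseW, wordsOut]
      · simp only [bSpec, mySplitP, hc, ih (k + 1)]
        simp [caseW]

-- ===== VERDICT (by name: the statement is the Claim_ definition above) =====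
theorem solution_spec : Claim_equal_solution := by
  intro s _
  show solution s = solution_alt s
  rw [solution_chars, solution_alt, foldB]
  rw [bSpec_eq]
  simp
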